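-- pv_equiv track=rewrite | github.com/imalsky/Chemulator | read.py | _select_table_cols
-- ===== SOURCE A (Python) =====
-- from typing import Any, Dict, Iterable, List, Optional, Sequence, Tuple
--
-- def _select_table_cols(header: Sequence[str], max_cols: int = 8) -> List[str]:
--     header_set = set(header)
--
--     priority = [
--         "epoch",
--         "train_loss",
--         "train_loss_log10_mae",
--         "val_loss",
--         "val_loss_log10_mae",
--         "val_loss_z_mse",
--         "epoch_time_sec",
--         "lr",
--         "test_loss",
--         "test_loss_log10_mae",
--     ]
--
--     cols = [c for c in priority if c in header_set]
--
--     # Dedup while preserving order.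
--     seen = set()
--     out: List[str] = []
--     for c in cols:
--         if c not in seen and c in header_set:
--             seen.add(c)
--             out.append(c)
--
--     # Always include epoch if present.
--     if "epoch" in header_set and (not out or out[0] != "epoch"):
--         out = ["epoch"] + [c for c in out if c != "epoch"]
--
--     return out[:max_cols]
-- ===== SOURCE B (Python) =====
-- from typing import List, Sequence
--
--
-- def _select_table_cols(header: Sequence[str], max_cols: int = 8) -> List[str]:
--     priority = [
--         "epoch",
--         "train_loss",
--         "train_loss_log10_mae",
--         "val_loss",
--         "val_loss_log10_mae",
--         "val_loss_z_mse",
--         "epoch_time_sec",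
--         "lr",
--         "test_loss",
--         "test_loss_log10_mae",
--     ]
--     rank = {name: i for i, name in enumerate(priority)}
--
--     seen = set()
--     picked: List[str] = []
--     for name in header:
--         if name in rank and name not in seen:
--             seen.add(name)
--             picked.append(name)
--
--     picked.sort(key=lambda n: rank[n])
--     return picked[:max_cols]
-- ===== Notes on version B (the rewrite author's own statement) =====
-- stated objective: alternative
-- what changed: B scans the header once collecting distinct priority names via a rank dict, then sorts them by rank, instead of A's three passes (filter priority by a header set, re-dedup, re-prepend 'epoch').
import Mathlib
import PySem

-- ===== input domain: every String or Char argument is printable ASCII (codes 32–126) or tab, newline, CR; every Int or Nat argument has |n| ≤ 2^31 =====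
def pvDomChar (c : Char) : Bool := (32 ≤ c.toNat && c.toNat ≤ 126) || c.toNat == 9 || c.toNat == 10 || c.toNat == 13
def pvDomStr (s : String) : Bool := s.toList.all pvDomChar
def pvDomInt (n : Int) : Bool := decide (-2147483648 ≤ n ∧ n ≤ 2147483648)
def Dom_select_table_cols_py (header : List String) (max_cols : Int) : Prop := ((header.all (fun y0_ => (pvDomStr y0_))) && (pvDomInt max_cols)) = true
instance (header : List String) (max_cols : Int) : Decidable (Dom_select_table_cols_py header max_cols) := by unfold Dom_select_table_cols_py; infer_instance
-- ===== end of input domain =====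

-- B is an alternative single-header-scan decomposition (rank dict + sort) of A's
-- three-pass priority selection; equivalence of return values is proved on all inputs.

-- The fixed priority list (module-level data shared by both ports).
def pvPriority : List String :=
  ["epoch", "train_loss", "train_loss_log10_mae", "val_loss", "val_loss_log10_mae",
   "val_loss_z_mse", "epoch_time_sec", "lr", "test_loss", "test_loss_log10_mae"]

-- ===== PORT A =====
def select_table_cols_py (header : List String) (max_cols : Int) : List String :=
  let header_set : PySem.Set String := PySem.Set.ofList header
  let cols : List String := pvPriority.filter (fun c => PySem.Set.contains header_set c)
  -- dedup while preserving order
  let st : PySem.Set String × List String :=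
    cols.foldl (fun st c =>
      if !(PySem.Set.contains st.1 c) && PySem.Set.contains header_set c then
        (PySem.Set.add st.1 c, st.2 ++ [c])
      else st) (PySem.Set.empty, [])
  let out := st.2
  -- always include epoch if present
  let out :=
    if PySem.Set.contains header_set "epoch" && (out.isEmpty || !(out.headD "" == "epoch")) then
      "epoch" :: out.filter (fun c => !(c == "epoch"))
    else out
  PySem.List.slice out none (some max_cols)

-- ===== PORT B =====
def select_table_cols_py_alt (header : List String) (max_cols : Int) : List String :=
  let rank : PySem.Dict String Int :=
    (PySem.List.enumerate pvPriority).foldl (fun d p => PySem.Dict.insert d p.2 p.1) PySem.Dict.empty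
  let st : PySem.Set String × List String :=
    header.foldl (fun st name =>
      if PySem.Dict.contains rank name && !(PySem.Set.contains st.1 name) then
        (PySem.Set.add st.1 name, st.2 ++ [name])
      else st) (PySem.Set.empty, [])
  let picked := PySem.List.sorted st.2 (fun n => PySem.Dict.getD rank n 0) false
  PySem.List.slice picked none (some max_cols)

-- ===== PRECONDITION & SPEC =====
def Spec_select_table_cols_py (header : List String) (max_cols : Int) (out : List String) : Prop := out = select_table_cols_py_alt header max_cols
instance (header : List String) (max_cols : Int) (out : List String) : Decidable (Spec_select_table_cols_py header max_cols out) := by unfold Spec_select_table_cols_py; infer_instance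

-- ===== CLAIM (what is proved, stated in full; the proofs are below) =====
def Claim_equal_select_table_cols_py : Prop := ∀ (header : List String) (max_cols : Int), Dom_select_table_cols_py header max_cols → Spec_select_table_cols_py header max_cols (select_table_cols_py header max_cols)

-- ===== LEMMAS AND PROOFS =====

-- Proof-side model of the "seen set + append" dedup loop both ports run.
def pvPick (p : String → Bool) : List String → PySem.Set String → List String
  | [], _ => []
  | x :: t, s => if p x && !(PySem.Set.contains s x) then x :: pvPick p t (PySem.Set.add s x) else pvPick p t s

theorem pv_contains_false_iff (s : PySem.Set String) (y : String) :
    PySem.Set.contains s y = false ↔ y ∉ s := by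
  constructor
  · intro h hm
    rw [(PySem.Set.contains_iff s y).mpr hm] at h
    simp at h
  · intro hm
    cases hc : PySem.Set.contains s y
    · rfl
    · exact absurd ((PySem.Set.contains_iff s y).mp hc) hm

theorem pv_contains_add_false (s : PySem.Set String) (x y : String) :
    PySem.Set.contains (PySem.Set.add s x) y = false ↔
      (PySem.Set.contains s y = false ∧ y ≠ x) := by
  rw [pv_contains_false_iff, pv_contains_false_iff]
  constructor
  · intro h
    exact ⟨fun hm => h ((PySem.Set.mem_add _ _ _).mpr (Or.inl hm)),
           fun he => h ((PySem.Set.mem_add _ _ _).mpr (Or.inr he))⟩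
  · rintro ⟨h1, h2⟩ hm
    rcases (PySem.Set.mem_add _ _ _).mp hm with hm | hm
    · exact h1 hm
    · exact h2 hm

theorem pvPick_foldl (p : String → Bool) (l : List String) (s : PySem.Set String) (o : List String) :
    (l.foldl (fun st c =>
      if p c && !(PySem.Set.contains st.1 c) then (PySem.Set.add st.1 c, st.2 ++ [c]) else st)
      (s, o)).2 = o ++ pvPick p l s := by
  induction l generalizing s o with
  | nil => simp [pvPick]
  | cons x t ih =>
    simp only [List.foldl_cons, pvPick]
    by_cases h : (p x && !(PySem.Set.contains s x)) = true
    · rw [if_pos h, if_pos h, ih]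
      simp
    · rw [if_neg h, if_neg h, ih]

-- same loop with A's condition order ('c not in seen and c in header_set')
theorem pvPick_foldl' (p : String → Bool) (l : List String) (s : PySem.Set String) (o : List String) :
    (l.foldl (fun st c =>
      if !(PySem.Set.contains st.1 c) && p c then (PySem.Set.add st.1 c, st.2 ++ [c]) else st)
      (s, o)).2 = o ++ pvPick p l s := by
  induction l generalizing s o with
  | nil => simp [pvPick]
  | cons x t ih =>
    simp only [List.foldl_cons, pvPick]
    by_cases h : (!(PySem.Set.contains s x) && p x) = true
    · rw [if_pos h, if_pos (by rw [Bool.and_comm] at h; exact h), ih]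
      simp
    · rw [if_neg h, if_neg (by rw [Bool.and_comm] at h; exact h), ih]

theorem mem_pvPick (p : String → Bool) (l : List String) (s : PySem.Set String) (y : String) :
    y ∈ pvPick p l s → p y = true ∧ y ∈ l ∧ PySem.Set.contains s y = false := by
  induction l generalizing s with
  | nil => simp [pvPick]
  | cons x t ih =>
    simp only [pvPick]
    split_ifs with h
    · intro hy
      have h' := h
      simp only [Bool.and_eq_true, Bool.not_eq_true'] at h'
      rcases List.mem_cons.mp hy with rfl | hy
      · exact ⟨h'.1, List.mem_cons_self, h'.2⟩
      · rcases ih _ hy with ⟨h1, h2, h3⟩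
        exact ⟨h1, List.mem_cons_of_mem _ h2, ((pv_contains_add_false s x y).mp h3).1⟩
    · intro hy
      rcases ih _ hy with ⟨h1, h2, h3⟩
      exact ⟨h1, List.mem_cons_of_mem _ h2, h3⟩

theorem pvPick_mem (p : String → Bool) (l : List String) :
    ∀ (s : PySem.Set String) (y : String), p y = true → y ∈ l →
      PySem.Set.contains s y = false → y ∈ pvPick p l s := by
  induction l with
  | nil => intro s y _ h _; simp at h
  | cons x t ih =>
    intro s y h1 h2 h3
    simp only [pvPick]
    split_ifs with h
    · rcases List.mem_cons.mp h2 with rfl | hy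
      · exact List.mem_cons_self
      · by_cases hxy : y = x
        · subst hxy; exact List.mem_cons_self
        · exact List.mem_cons_of_mem _
            (ih _ _ h1 hy ((pv_contains_add_false s x y).mpr ⟨h3, hxy⟩))
    · rcases List.mem_cons.mp h2 with rfl | hy
      · exact absurd (by simp [h1, (pv_contains_false_iff s y).mp h3]) h
      · exact ih _ _ h1 hy h3

theorem pvPick_nodup (p : String → Bool) (l : List String) (s : PySem.Set String) :
    (pvPick p l s).Nodup := by
  induction l generalizing s with
  | nil => simp [pvPick]
  | cons x t ih =>
    simp only [pvPick]
    split_ifs with h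
    · refine List.nodup_cons.mpr ⟨?_, ih _⟩
      intro hx
      have h3 := (mem_pvPick p t _ x hx).2.2
      exact ((pv_contains_add_false s x x).mp h3).2 rfl
    · exact ih _

theorem pvPriority_nodup : pvPriority.Nodup := by decide

-- pvPick over a nodup list all of whose elements pass p returns the list itself.
theorem pvPick_eq_self (p : String → Bool) (l : List String) (s : PySem.Set String)
    (hn : l.Nodup) (hp : ∀ x ∈ l, p x = true) (hs : ∀ x ∈ l, PySem.Set.contains s x = false) :
    pvPick p l s = l := by
  induction l generalizing s with
  | nil => simp [pvPick]
  | cons x t ih =>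
    have hnd := List.nodup_cons.mp hn
    have h1 := hp x List.mem_cons_self
    have h3 := hs x List.mem_cons_self
    simp only [pvPick]
    rw [if_pos (by simp [h1, (pv_contains_false_iff s x).mp h3])]
    congr 1
    exact ih _ hnd.2 (fun y hy => hp y (List.mem_cons_of_mem _ hy))
      (fun y hy => (pv_contains_add_false s x y).mpr
        ⟨hs y (List.mem_cons_of_mem _ hy), fun he => hnd.1 (he ▸ hy)⟩)

-- B's rank dict is a closed term.
def pvRank : PySem.Dict String Int :=
  (PySem.List.enumerate pvPriority).foldl (fun d p => PySem.Dict.insert d p.2 p.1) PySem.Dict.empty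

theorem pvRank_contains (n : String) :
    PySem.Dict.contains pvRank n = true ↔ n ∈ pvPriority := by
  have hr : pvRank = PySem.Dict.mk
      [("epoch", 0), ("train_loss", 1), ("train_loss_log10_mae", 2), ("val_loss", 3),
       ("val_loss_log10_mae", 4), ("val_loss_z_mse", 5), ("epoch_time_sec", 6), ("lr", 7),
       ("test_loss", 8), ("test_loss_log10_mae", 9)] := by decide
  rw [hr]
  simp [PySem.Dict.contains_mk, pvPriority]
  tauto

-- Strict rank-increasing order of pvPriority (closed fact).
theorem pvPriority_pairwise :
    pvPriority.Pairwise (fun a b => PySem.Dict.getD pvRank a 0 < PySem.Dict.getD pvRank b 0) := by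
  decide

-- The sorted picked list equals the priority-order filter.
theorem sorted_pick_eq (header : List String) :
    PySem.List.sorted (pvPick (fun n => PySem.Dict.contains pvRank n) header PySem.Set.empty)
      (fun n => PySem.Dict.getD pvRank n 0)
    = pvPriority.filter (fun c => PySem.Set.contains (PySem.Set.ofList header) c) := by
  apply PySem.List.sorted_eq_of_perm_of_pairwise_lt
  · apply List.perm_of_nodup_nodup_toFinset_eq
    · exact List.Nodup.filter _ pvPriority_nodup
    · exact pvPick_nodup _ _ _
    · ext y
      simp only [List.mem_toFinset, List.mem_filter]
      constructor
      · rintro ⟨hy, hc⟩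
        have hyh : y ∈ header :=
          (PySem.Set.mem_ofList _ _).mp ((PySem.Set.contains_iff _ _).mp hc)
        exact pvPick_mem _ _ _ _ ((pvRank_contains y).mpr hy) hyh rfl
      · intro hy
        rcases mem_pvPick _ _ _ _ hy with ⟨h1, h2, _⟩
        exact ⟨(pvRank_contains y).mp h1,
          (PySem.Set.contains_iff _ _).mpr ((PySem.Set.mem_ofList _ _).mpr h2)⟩
  · exact List.Pairwise.filter _ pvPriority_pairwise

-- A's value before the final slice: the dedup and epoch passes are the identity.
theorem a_eval (header : List String) (max_cols : Int) :
    select_table_cols_py header max_cols =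
      PySem.List.slice (pvPriority.filter
        (fun c => PySem.Set.contains (PySem.Set.ofList header) c)) none (some max_cols) := by
  simp only [select_table_cols_py]
  have hfold := pvPick_foldl' (fun c => PySem.Set.contains (PySem.Set.ofList header) c)
      (pvPriority.filter (fun c => PySem.Set.contains (PySem.Set.ofList header) c))
      PySem.Set.empty []
  rw [List.nil_append] at hfold
  rw [hfold, pvPick_eq_self _ _ _ (List.Nodup.filter _ pvPriority_nodup)
        (fun x hx => (List.mem_filter.mp hx).2) (fun x _ => rfl)]
  congr 1
  by_cases he : PySem.Set.contains (PySem.Set.ofList header) "epoch" = true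
  · have hm : "epoch" ∈ header :=
      (PySem.Set.mem_ofList _ _).mp ((PySem.Set.contains_iff _ _).mp he)
    have hcols : pvPriority.filter (fun c => PySem.Set.contains (PySem.Set.ofList header) c)
        = "epoch" :: (List.filter (fun c => PySem.Set.contains (PySem.Set.ofList header) c)
        ["train_loss", "train_loss_log10_mae", "val_loss", "val_loss_log10_mae",
         "val_loss_z_mse", "epoch_time_sec", "lr", "test_loss", "test_loss_log10_mae"]) := by
      simp [pvPriority, List.filter_cons, hm]
    rw [hcols]
    simp
  · have hm : "epoch" ∉ header := fun h =>
      he ((PySem.Set.contains_iff _ _).mpr ((PySem.Set.mem_ofList _ _).mpr h))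
    rw [if_neg (by simp [hm])]

-- B's value before the final slice.
theorem b_eval (header : List String) (max_cols : Int) :
    select_table_cols_py_alt header max_cols =
      PySem.List.slice (PySem.List.sorted
        (pvPick (fun n => PySem.Dict.contains pvRank n) header PySem.Set.empty)
        (fun n => PySem.Dict.getD pvRank n 0)) none (some max_cols) := by
  simp only [select_table_cols_py_alt]
  rw [show (PySem.List.enumerate pvPriority).foldl
        (fun d p => PySem.Dict.insert d p.2 p.1) PySem.Dict.empty = pvRank from rfl]
  have hfoldB :
      (header.foldl (fun st name =>
        if PySem.Dict.contains pvRank name && !(PySem.Set.contains st.1 name) then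
          (PySem.Set.add st.1 name, st.2 ++ [name])
        else st) (PySem.Set.empty, ([] : List String))).2
      = pvPick (fun n => PySem.Dict.contains pvRank n) header PySem.Set.empty := by
    have := pvPick_foldl (fun n => PySem.Dict.contains pvRank n) header PySem.Set.empty []
    rw [List.nil_append] at this
    rw [← this]
  rw [hfoldB]

-- ===== VERDICT (by name: the statement is the Claim_ definition above) =====
theorem select_table_cols_py_spec : Claim_equal_select_table_cols_py := by
  intro header max_cols _
  show select_table_cols_py header max_cols = select_table_cols_py_alt header max_cols
  rw [a_eval, b_eval, sorted_pick_eq]
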